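-- pv_equiv track=rewrite | github.com/MrBrantCode/unitest_baseline | mut_generate/mist_train_taco/taco_11390/solution.py | minimize_integer
-- ===== SOURCE A (Python) =====
-- def minimize_integer(n: int, k: int, S: str) -> str:
--     S = list(S)
--     i = 0
--
--     if k == 0:
--         return ''.join(S)
--
--     if n == 1:
--         return '0'
--
--     while k > 0:
--         if i >= n:
--             break
--
--         if i == 0:
--             if int(S[0]) > 1:
--                 S[0] = '1'
--                 k -= 1
--         else:
--             if int(S[i]) > 0:
--                 S[i] = '0'
--                 k -= 1
--
--         i += 1
--
--     return ''.join(S)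
-- ===== SOURCE B (Python) =====
-- def minimize_integer(n: int, k: int, S: str) -> str:
--     if k == 0:
--         return S
--     if n == 1:
--         return '0'
--     if k < 0 or n <= 0:
--         # no budget to spend / no position the loop may touch
--         return S
--     if S[0] > '1':
--         head, b = '1', k - 1
--     else:
--         head, b = S[0], k
--     body = S[1:n]  # the only region the remaining budget can reach
--     # cut = length of the shortest prefix of body containing b nonzero digits
--     # (a changed digit and an unchanged '0' both end up '0', so the whole
--     # reached region becomes a run of zeros)
--     cut = len(body)
--     if b == 0:
--         cut = 0
--     else:
--         seen = 0
--         for idx, c in enumerate(body):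
--             if c != '0':
--                 seen += 1
--                 if seen == b:
--                     cut = idx + 1
--                     break
--     return head + '0' * cut + S[1 + cut:]
-- ===== Notes on version B (the rewrite author's own statement) =====
-- stated objective: alternative
-- what changed: A rewrites digits one position at a time inside a budget-decrementing while-loop; B instead locates the single boundary where the budget runs out (the b-th nonzero digit after the head) and rebuilds the answer in closed form as head + '0'*cut + untouched tail, exploiting the fact that every digit in the reached region ends up '0'.
import Mathlib
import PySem

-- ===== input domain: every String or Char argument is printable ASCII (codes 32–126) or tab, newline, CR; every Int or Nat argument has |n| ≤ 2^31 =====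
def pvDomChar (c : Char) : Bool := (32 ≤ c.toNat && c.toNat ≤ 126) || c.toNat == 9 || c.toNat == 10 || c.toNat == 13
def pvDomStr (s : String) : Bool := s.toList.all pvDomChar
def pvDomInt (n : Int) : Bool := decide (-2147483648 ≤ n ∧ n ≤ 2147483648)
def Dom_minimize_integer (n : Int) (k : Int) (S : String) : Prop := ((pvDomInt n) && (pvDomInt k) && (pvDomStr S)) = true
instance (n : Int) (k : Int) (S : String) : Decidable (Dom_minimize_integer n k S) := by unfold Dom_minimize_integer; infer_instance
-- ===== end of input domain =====

-- B locates the one boundary where the budget runs out and rebuilds the answer in closed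
-- form as head ++ zeros ++ untouched tail; A rewrites digit positions one at a time.

-- ===== PORT A =====

-- int(S[i]) for a single character: none of ofStr? = ValueError, pyGet? none = IndexError;
-- both are excluded by Pre_, so the total getD defaults are never reached inside Pre_.
def pyDigitAt (Sl : List Char) (i : Int) : Int :=
  (PySem.Int.ofStr? (String.ofList [(PySem.List.pyGet? Sl i).getD '0'])).getD 0

-- the while-loop of A: state (Sl, k, i), terminates because i increases towards n
def loopA (n : Int) (Sl : List Char) (k : Int) (i : Int) : List Char :=
  if _h : k > 0 then
    if i ≥ n then Sl
    else
      if i == 0 then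
        if pyDigitAt Sl 0 > 1 then loopA n (PySem.List.pySetD Sl 0 '1') (k - 1) (i + 1)
        else loopA n Sl k (i + 1)
      else
        if pyDigitAt Sl i > 0 then loopA n (PySem.List.pySetD Sl i '0') (k - 1) (i + 1)
        else loopA n Sl k (i + 1)
  else Sl
termination_by (n - i).toNat
decreasing_by all_goals omega

def minimize_integer (n : Int) (k : Int) (S : String) : String :=
  let Sl := S.toList
  if k == 0 then String.ofList Sl
  else if n == 1 then "0"
  else String.ofList (loopA n Sl k 0)

-- ===== PORT B =====

-- the scan of Source B: length of the shortest prefix of `cs` containing b nonzeros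
-- (fullLen = len(body) is the value `cut` keeps when the loop finds fewer than b)
def cutLoopB (b : Int) (cs : List Char) (idx : Int) (seen : Int) (fullLen : Int) : Int :=
  match cs with
  | [] => fullLen
  | c :: rest =>
    if c ≠ '0' then
      if seen + 1 == b then idx + 1
      else cutLoopB b rest (idx + 1) (seen + 1) fullLen
    else cutLoopB b rest (idx + 1) seen fullLen

def minimize_integer_alt (n : Int) (k : Int) (S : String) : String :=
  if k == 0 then S
  else if n == 1 then "0"
  else if k < 0 ∨ n ≤ 0 then S
  else
    let cs := S.toList
    -- S[0]; pyGet? none = IndexError (Source B raises there too) — excluded by Pre_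
    let c0 := (PySem.List.pyGet? cs 0).getD '0'
    let hb := if '1' < c0 then ('1', k - 1) else (c0, k)
    let body := PySem.List.slice cs (some 1) (some n)      -- S[1:n]
    let cut := if hb.2 == 0 then 0 else cutLoopB hb.2 body 0 0 (body.length : Int)
    -- head + '0'*cut + S[1+cut:]  (cut ≥ 0 always, so the tail slice is a drop)
    String.ofList (hb.1 :: (List.replicate cut.toNat '0' ++ cs.drop (1 + cut).toNat))

-- ===== PRECONDITION & SPEC =====

-- position i holds a digit character (False also covers a missing index, i.e. IndexError)
def digitAtB (Sl : List Char) (i : Nat) : Bool :=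
  match Sl[i]? with
  | some c => decide ('0' ≤ c ∧ c ≤ '9')
  | none => false

-- position i, when read while budget remains, consumes one unit of budget
def hitB (Sl : List Char) (i : Nat) : Bool :=
  match Sl[i]? with
  | some c => if i = 0 then decide ('1' < c) else decide (c ≠ '0')
  | none => false

-- Pre_ excludes exactly the inputs on which A raises: A reads S[i] (as int(S[i])) for every
-- i < n reached while budget remains, i.e. while fewer than k earlier positions consumed
-- budget; each such position must exist (else IndexError) and hold a digit (else ValueError).
def Pre_minimize_integer (n : Int) (k : Int) (S : String) : Prop :=
  k ≤ 0 ∨ n = 1 ∨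
    ∀ i : Nat, (i : Int) < n → (((List.range i).countP (hitB S.toList) : Int) < k) →
      digitAtB S.toList i = true
instance (n : Int) (k : Int) (S : String) : Decidable (Pre_minimize_integer n k S) := by
  unfold Pre_minimize_integer
  have : (∀ i ∈ List.range n.toNat, (((List.range i).countP (hitB S.toList) : Int) < k) →
        digitAtB S.toList i = true) ↔
        (∀ i : Nat, (i : Int) < n → (((List.range i).countP (hitB S.toList) : Int) < k) →
        digitAtB S.toList i = true) := by
    constructor
    · intro h i hi; exact h i (List.mem_range.mpr (by omega))
    · intro h i hi; exact h i (by have := List.mem_range.mp hi; omega)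
  exact instDecidableOr (dq := instDecidableOr (dq := decidable_of_iff _ this))

def pvWitness_minimize_integer : Int × Int × String := (4, 2, "3049")

def Spec_minimize_integer (n : Int) (k : Int) (S : String) (out : String) : Prop := out = minimize_integer_alt n k S
instance (n : Int) (k : Int) (S : String) (out : String) : Decidable (Spec_minimize_integer n k S out) := by unfold Spec_minimize_integer; infer_instance

-- ===== CLAIM (what is proved, stated in full; the proofs are below) =====
def Claim_equal_minimize_integer : Prop := ∀ (n : Int) (k : Int) (S : String), Dom_minimize_integer n k S → Pre_minimize_integer n k S → Spec_minimize_integer n k S (minimize_integer n k S)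

-- ===== LEMMAS AND PROOFS =====

theorem digit_ofStr (c : Char) (h1 : '0' ≤ c) (h2 : c ≤ '9') :
    PySem.Int.ofStr? (String.ofList [c]) = some ((c.toNat : Int) - 48) := by
  have ha : 48 ≤ c.toNat := h1
  have hb : c.toNat ≤ 57 := h2
  have hc : c = Char.ofNat c.toNat := (Char.ofNat_toNat c).symm
  interval_cases h : c.toNat <;> simp_all <;> subst hc <;> decide

theorem countP_range_succ (f : Nat → Bool) (i : Nat) :
    (List.range (i + 1)).countP f = (List.range i).countP f + (if f i then 1 else 0) := by
  simp [List.range_succ, List.countP_append, List.countP_singleton]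

theorem countP_range_mono (f : Nat → Bool) (i j : Nat) (h : i ≤ j) :
    (List.range i).countP f ≤ (List.range j).countP f :=
  List.Sublist.countP_le (p := f) (List.range_sublist.mpr h)

-- the main induction: from position i ≥ 1 on, A's loop (on the list whose first i
-- positions are already head/zeros) produces exactly B's zeros-up-to-cut picture
theorem phase2 (n k b : Int) (Cs : List Char)
    (hd : ∀ j : Nat, (j : Int) < n → (((List.range j).countP (hitB Cs) : Int) < k) →
      digitAtB Cs j = true)
    (headc : Char) :
    ∀ (t i : Nat), 1 ≤ i → (i : Int) ≤ n → (n - (i : Int)).toNat = t →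
    ∀ (r seen fullLen : Int), 0 < r →
      r = k - ((List.range i).countP (hitB Cs) : Int) →
      b - seen = r →
      fullLen = (((Cs.drop 1).take (n - 1).toNat).length : Int) →
      loopA n (headc :: (List.replicate (i - 1) '0' ++ Cs.drop i)) r i
        = headc :: (List.replicate
            (cutLoopB b ((Cs.drop i).take ((n - i : Int)).toNat) ((i : Int) - 1) seen fullLen).toNat '0'
            ++ Cs.drop (1 + cutLoopB b ((Cs.drop i).take ((n - i : Int)).toNat) ((i : Int) - 1) seen fullLen).toNat) := by
  intro t
  induction t with
  | zero =>
    intro i h1 hin ht r seen fullLen hr hcount hseen hfull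
    have hieq : (i : Int) = n := by omega
    have hnil : ((Cs.drop i).take ((n - i : Int)).toNat) = [] := by
      have h0 : ((n - i : Int)).toNat = 0 := by omega
      rw [h0]; simp
    rw [hnil, cutLoopB]
    -- the budget is unspent at i = n, so position i-1 (< n) was readable: n - 1 < |Cs|
    have hcnt : ((List.range (i - 1)).countP (hitB Cs) : Int) < k := by
      have := countP_range_mono (hitB Cs) (i - 1) i (by omega)
      omega
    have hdig := hd (i - 1) (by omega) hcnt
    have hlen : i - 1 < Cs.length := by
      unfold digitAtB at hdig
      cases h : Cs[i - 1]? with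
      | none => rw [h] at hdig; simp at hdig
      | some c => exact (List.getElem?_eq_some_iff.mp h).1
    have hfull' : fullLen = (i : Int) - 1 := by
      rw [hfull]
      simp only [List.length_take, List.length_drop]
      omega
    rw [hfull']
    rw [loopA, dif_pos hr, if_pos (by omega : (i : Int) ≥ n)]
    have e1 : ((i : Int) - 1).toNat = i - 1 := by omega
    have e2 : (1 + ((i : Int) - 1)).toNat = i := by omega
    rw [e1, e2]
  | succ t ih =>
    intro i h1 hin ht r seen fullLen hr hcount hseen hfull
    obtain ⟨j, rfl⟩ : ∃ j, i = j + 1 := ⟨i - 1, by omega⟩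
    have hiln : ((j + 1 : Nat) : Int) < n := by push_cast; push_cast at ht; omega
    have hdig := hd (j + 1) hiln (by omega)
    obtain ⟨c, hc, h0, h9⟩ : ∃ c, Cs[j + 1]? = some c ∧ '0' ≤ c ∧ c ≤ '9' := by
      unfold digitAtB at hdig
      cases h : Cs[j + 1]? with
      | none => rw [h] at hdig; simp at hdig
      | some c => rw [h] at hdig; simp at hdig; exact ⟨c, rfl, hdig⟩
    obtain ⟨hiL, hgetc⟩ := List.getElem?_eq_some_iff.mp hc
    have hdrop : Cs.drop (j + 1) = c :: Cs.drop (j + 2) := by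
      rw [List.drop_eq_getElem_cons hiL, hgetc]
    have htake : (Cs.drop (j + 1)).take ((n - ((j + 1 : Nat) : Int))).toNat
        = c :: (Cs.drop (j + 2)).take ((n - ((j + 2 : Nat) : Int))).toNat := by
      rw [hdrop]
      have e : ((n - ((j + 1 : Nat) : Int))).toNat = ((n - ((j + 2 : Nat) : Int))).toNat + 1 := by
        push_cast; push_cast at hiln; omega
      rw [e, List.take_succ_cons]
    rw [htake]
    -- one step of A's loop
    rw [loopA, dif_pos hr, if_neg (by omega : ¬ ((j + 1 : Nat) : Int) ≥ n)]
    rw [if_neg (show ¬ ((((j + 1 : Nat) : Int)) == 0) = true by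
      simp only [beq_iff_eq]; push_cast; omega)]
    -- A reads position j+1 of its working list, which is c
    have hSl : (headc :: (List.replicate (j + 1 - 1) '0' ++ Cs.drop (j + 1)))[j + 1]? = some c := by
      have hsh : headc :: (List.replicate j '0' ++ Cs.drop (j + 1))
          = (headc :: List.replicate j '0') ++ Cs.drop (j + 1) := by simp
      simp only [Nat.add_sub_cancel, hsh]
      rw [List.getElem?_append_right (by simp)]
      simp [hdrop]
    have hpd : pyDigitAt (headc :: (List.replicate (j + 1 - 1) '0' ++ Cs.drop (j + 1)))
        ((j + 1 : Nat) : Int) = (c.toNat : Int) - 48 := by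
      unfold pyDigitAt
      rw [PySem.List.pyGet?_natCast, hSl]
      simp [digit_ofStr c h0 h9]
    rw [hpd]
    -- shape bookkeeping for the next state of A's list
    have hresh : List.replicate j '0' ++ '0' :: Cs.drop (j + 2)
        = List.replicate (j + 1) '0' ++ Cs.drop (j + 2) := by
      rw [List.replicate_succ']; simp
    by_cases hcz : c = '0'
    · -- miss: no budget spent, the visited '0' joins the zero run
      rw [if_neg (show ¬ ((c.toNat : Int) - 48 > 0) by subst hcz; decide)]
      rw [cutLoopB]
      rw [if_neg (show ¬ (c ≠ '0') by simp [hcz])]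
      have hhit : hitB Cs (j + 1) = false := by
        unfold hitB; rw [hc]; simp [hcz]
      have hstep := ih (j + 2) (by omega) (by push_cast; push_cast at ht; omega)
        (by push_cast; push_cast at ht; omega) r seen fullLen hr
        (by rw [show j + 2 = (j + 1) + 1 from rfl, countP_range_succ, hhit]
            simpa using hcount)
        hseen hfull
      have hlist : headc :: (List.replicate (j + 1 - 1) '0' ++ Cs.drop (j + 1))
          = headc :: (List.replicate (j + 2 - 1) '0' ++ Cs.drop (j + 2)) := by
        simp only [Nat.add_sub_cancel]
        rw [hdrop]
        simp only [show j + 2 - 1 = j + 1 from rfl]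
        rw [← hresh]
        simp [hcz]
      rw [hlist]
      have hidx : ((j + 1 : Nat) : Int) - 1 + 1 = ((j + 2 : Nat) : Int) - 1 := by push_cast; ring
      rw [hidx]
      have hnext : ((j + 1 : Nat) : Int) + 1 = ((j + 2 : Nat) : Int) := by push_cast; ring
      rw [hnext]
      exact hstep
    · -- hit: the digit is zeroed and one budget unit is spent
      have hlt : '0' < c := lt_of_le_of_ne h0 (Ne.symm hcz)
      have h48 : 48 < c.toNat := hlt
      rw [if_pos (show (c.toNat : Int) - 48 > 0 by omega)]
      rw [cutLoopB, if_pos (show (c ≠ '0') from hcz)]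
      have hhit : hitB Cs (j + 1) = true := by
        unfold hitB; rw [hc]; simp [hcz]
      -- A's list after the write
      have hset : PySem.List.pySetD
            (headc :: (List.replicate (j + 1 - 1) '0' ++ Cs.drop (j + 1)))
            ((j + 1 : Nat) : Int) '0'
          = headc :: (List.replicate (j + 2 - 1) '0' ++ Cs.drop (j + 2)) := by
        rw [PySem.List.pySetD_natCast]
        simp only [Nat.add_sub_cancel, show j + 2 - 1 = j + 1 from rfl]
        rw [hdrop, List.set_cons_succ]
        have hpre : (List.replicate j '0' ++ c :: Cs.drop (j + 2)).set j '0'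
            = List.replicate j '0' ++ '0' :: Cs.drop (j + 2) := by
          simp  -- set at the length of the replicate prefix hits the cons head
        rw [hpre, hresh]
      by_cases hb1 : seen + 1 = b
      · -- budget exhausted exactly here: both sides stop with cut = j + 1
        rw [if_pos (by simp [hb1])]
        rw [hset]
        have hr1 : r = 1 := by omega
        rw [loopA]
        rw [dif_neg (by omega : ¬ (r - 1 > 0))]
        have e0 : ((j + 1 : Nat) : Int) - 1 + 1 = ((j + 1 : Nat) : Int) := by ring
        rw [e0]
        have e1 : (((j + 1 : Nat) : Int)).toNat = j + 1 := by omega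
        have e2 : (1 + ((j + 1 : Nat) : Int)).toNat = j + 2 := by omega
        rw [e1, e2]
        simp
      · -- budget remains: recurse
        rw [if_neg (by simp [hb1])]
        rw [hset]
        have ha1 : 1 ≤ j + 2 := by omega
        have ha2 : ((j + 2 : Nat) : Int) ≤ n := by push_cast; push_cast at ht; omega
        have ha3 : (n - ((j + 2 : Nat) : Int)).toNat = t := by push_cast; push_cast at ht; omega
        have ha4 : 0 < r - 1 := by omega
        have ha5 : r - 1 = k - ((List.range (j + 2)).countP (hitB Cs) : Int) := by
          have hcc : (List.range (j + 2)).countP (hitB Cs)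
              = (List.range (j + 1)).countP (hitB Cs) + 1 := by
            rw [show j + 2 = (j + 1) + 1 from rfl, countP_range_succ, hhit]; simp
          rw [hcc]; push_cast; omega
        have ha6 : b - (seen + 1) = r - 1 := by omega
        have hstep := ih (j + 2) ha1 ha2 ha3 (r - 1) (seen + 1) fullLen ha4 ha5 ha6 hfull
        have hidx : ((j + 1 : Nat) : Int) - 1 + 1 = ((j + 2 : Nat) : Int) - 1 := by push_cast; ring
        rw [hidx]
        have hnext : ((j + 1 : Nat) : Int) + 1 = ((j + 2 : Nat) : Int) := by push_cast; ring
        rw [hnext]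
        exact hstep

theorem minimize_integer_spec : Claim_equal_minimize_integer := by
  intro n k S _ hpre
  unfold Spec_minimize_integer minimize_integer minimize_integer_alt
  by_cases hk0 : k = 0
  · simp [hk0]
  · have hkb : (k == 0) = false := by simp [hk0]
    simp only [hkb, Bool.false_eq_true, if_false]
    by_cases hn1 : n = 1
    · simp [hn1]
    · have hnb : (n == 1) = false := by simp [hn1]
      simp only [hnb, Bool.false_eq_true, if_false]
      by_cases hkneg : k < 0
      · rw [if_pos (Or.inl hkneg)]
        rw [loopA, dif_neg (by omega : ¬ (k > 0))]
        simp
      · have hkpos : 0 < k := by omega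
        by_cases hn0 : n ≤ 0
        · rw [if_pos (Or.inr hn0)]
          rw [loopA, dif_pos hkpos, if_pos (by omega : (0 : Int) ≥ n)]
          simp
        · have hn2 : 2 ≤ n := by omega
          rw [if_neg (by rintro (h | h) <;> omega)]
          have hd : ∀ j : Nat, (j : Int) < n →
              (((List.range j).countP (hitB S.toList) : Int) < k) →
              digitAtB S.toList j = true := by
            rcases hpre with h | h | h
            · omega
            · exact absurd h hn1
            · exact h
          have hdig0 := hd 0 (by omega) (by simp; omega)
          obtain ⟨c0, hc0, h00, h09⟩ : ∃ c, S.toList[0]? = some c ∧ '0' ≤ c ∧ c ≤ '9' := by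
            unfold digitAtB at hdig0
            cases h : S.toList[0]? with
            | none => rw [h] at hdig0; simp at hdig0
            | some c => rw [h] at hdig0; simp at hdig0; exact ⟨c, rfl, hdig0⟩
          obtain ⟨rest, hCs⟩ : ∃ rest, S.toList = c0 :: rest := by
            cases h : S.toList with
            | nil => rw [h] at hc0; simp at hc0
            | cons x xs => rw [h] at hc0; simp at hc0; exact ⟨xs, by rw [hc0]⟩
          have hrest : rest = S.toList.drop 1 := by simp [hCs]
          subst hrest
          -- B's pieces
          have hget0 : (PySem.List.pyGet? S.toList 0).getD '0' = c0 := by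
            rw [PySem.List.pyGet?_zero, hc0]; rfl
          have hslice : PySem.List.slice S.toList (some 1) (some n)
              = (S.toList.drop 1).take (n - 1).toNat := by
            rw [PySem.List.slice_toNat _ (by omega) (by omega)]
            congr 1
            omega
          -- A's first step reads digit c0
          have hpd0 : pyDigitAt S.toList 0 = (c0.toNat : Int) - 48 := by
            unfold pyDigitAt
            rw [PySem.List.pyGet?_zero, hc0]
            simp [digit_ofStr c0 h00 h09]
          rw [loopA, dif_pos hkpos, if_neg (by omega : ¬ ((0 : Int) ≥ n)),
            if_pos (by simp), hpd0]
          simp only [hget0, hslice]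
          by_cases hhit0 : '1' < c0
          · -- first digit is lowered to '1' and one budget unit is spent
            have h49 : 49 < c0.toNat := hhit0
            rw [if_pos (by omega : (c0.toNat : Int) - 48 > 1)]
            rw [if_pos hhit0]
            have hset0 : PySem.List.pySetD S.toList (0 : Int) '1' = '1' :: S.toList.drop 1 := by
              rw [show (0 : Int) = ((0 : Nat) : Int) from rfl, PySem.List.pySetD_natCast,
                hCs, List.set_cons_zero]
              simp
            rw [hset0]
            have hhitB0 : hitB S.toList 0 = true := by
              unfold hitB; rw [hc0]; simp [hhit0]
            by_cases hb0 : k - 1 = 0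
            · rw [if_pos (by simp [hb0])]
              rw [loopA, dif_neg (by omega : ¬ (k - 1 > 0))]
              dsimp only
              norm_num
            · rw [if_neg (by simp [hb0])]
              have := phase2 n k (k - 1) S.toList hd '1' ((n - 1).toNat) 1 (by omega)
                (by omega) (by omega) (k - 1) 0
                (((S.toList.drop 1).take (n - 1).toNat).length : Int)
                (by omega)
                (by rw [show (1 : Nat) = 0 + 1 from rfl, countP_range_succ, hhitB0]; simp)
                (by omega) rfl
              simp only [Nat.cast_one] at this
              rw [show ((1 : Nat) - 1) = 0 from rfl] at this
              rw [show ((1 : Int) - 1) = 0 from rfl] at this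
              simp only [List.replicate_zero, List.nil_append] at this
              rw [show (n - (1 : Int)) = n - 1 from rfl] at this
              rw [show ((0 : Int) + 1) = 1 by norm_num]
              dsimp only
              exact congrArg String.ofList this
          · -- first digit stays; full budget k remains
            have h49 : c0.toNat ≤ 49 := by
              by_contra h
              exact hhit0 (show (49 : Nat) < c0.toNat by omega)
            rw [if_neg (by omega : ¬ ((c0.toNat : Int) - 48 > 1))]
            rw [if_neg hhit0]
            have hhitB0 : hitB S.toList 0 = false := by
              unfold hitB; rw [hc0]; simp [hhit0]
            rw [if_neg (by simp; omega)]
            have := phase2 n k k S.toList hd c0 ((n - 1).toNat) 1 (by omega)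
              (by omega) (by omega) k 0
              (((S.toList.drop 1).take (n - 1).toNat).length : Int)
              (by omega)
              (by rw [show (1 : Nat) = 0 + 1 from rfl, countP_range_succ, hhitB0]; simp)
              (by omega) rfl
            simp only [Nat.cast_one] at this
            rw [show ((1 : Nat) - 1) = 0 from rfl] at this
            rw [show ((1 : Int) - 1) = 0 from rfl] at this
            simp only [List.replicate_zero, List.nil_append] at this
            rw [show (n - (1 : Int)) = n - 1 from rfl] at this
            rw [← hCs] at this
            rw [show ((0 : Int) + 1) = 1 by norm_num]
            dsimp only
            exact congrArg String.ofList this
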